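-- pv_equiv track=rewrite | github.com/Ema93sh/abp | abp/explanations/pdx.py | get_mse
-- ===== SOURCE A (Python) =====
-- def get_mse(pdx):
--     sorted = all(pdx[i] >= pdx[i + 1] for i in range(len(pdx) - 1))
--     if not sorted:
--         raise "The pdx should be sorted in decending order!!!!!"
--     positive_pdx = [pdx[i] for i in range(len(pdx)) if pdx[i] > 0]
--     negative_pdx = [pdx[i] for i in range(len(pdx)) if pdx[i] < 0]
--
--     if len(negative_pdx) == 0:
--         return []
--
--     for i in range(len(pdx)):
--         if sum(positive_pdx[:i]) > abs(sum(negative_pdx)):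
--             return positive_pdx[:i]
--     return pdx
-- ===== SOURCE B (Python) =====
-- def get_mse(pdx):
--     if any(x < y for x, y in zip(pdx, pdx[1:])):
--         raise ValueError("The pdx should be sorted in decending order!!!!!")
--     target = -sum(x for x in pdx if x < 0)
--     if target == 0:
--         return []
--     prefix, total = [], 0
--     for x in pdx:
--         if x > 0:
--             prefix.append(x)
--             total += x
--             if total > target:
--                 return prefix
--     return pdx
-- ===== Notes on version B (the rewrite author's own statement) =====
-- stated objective: faster
-- what changed: Single pass with a running prefix sum over the elements replaces A's index loop that re-sums positive_pdx[:i] from scratch at every iteration.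
import Mathlib
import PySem

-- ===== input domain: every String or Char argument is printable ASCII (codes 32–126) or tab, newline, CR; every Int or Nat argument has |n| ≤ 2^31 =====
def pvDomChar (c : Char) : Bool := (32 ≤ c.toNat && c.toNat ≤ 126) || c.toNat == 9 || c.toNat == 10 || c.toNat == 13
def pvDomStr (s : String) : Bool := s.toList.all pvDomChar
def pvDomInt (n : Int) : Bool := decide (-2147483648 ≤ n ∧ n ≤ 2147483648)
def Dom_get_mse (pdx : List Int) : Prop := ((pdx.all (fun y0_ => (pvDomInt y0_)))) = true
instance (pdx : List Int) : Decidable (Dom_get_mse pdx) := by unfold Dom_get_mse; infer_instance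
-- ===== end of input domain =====

-- B replaces A's index loop that re-sums positive_pdx[:i] each iteration by one pass with a
-- running prefix sum (faster, asymptotic); A raises on unsorted input (excluded by Pre_), B raises ValueError there.


-- ===== PORT A =====
-- "for i in range(len(pdx)): if sum(positive_pdx[:i]) > abs(sum(negative_pdx)): return positive_pdx[:i]"
def aloop (pos : List Int) (tgt : Int) (pdx : List Int) : List Nat → List Int
  | [] => pdx
  | i :: rest => if (pos.take i).sum > tgt then pos.take i else aloop pos tgt pdx rest

def get_mse (pdx : List Int) : List Int :=
  let sorted := (List.range (pdx.length - 1)).all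
      (fun i => decide (pdx.getD i 0 ≥ pdx.getD (i + 1) 0))
  if !sorted then []   -- Python: raise — no value returned; Pre_get_mse excludes these inputs
  else
    let positive_pdx := pdx.filter (fun x => decide (x > 0))
    let negative_pdx := pdx.filter (fun x => decide (x < 0))
    if negative_pdx.length = 0 then []
    else aloop positive_pdx |negative_pdx.sum| pdx (List.range pdx.length)

-- ===== PORT B =====
-- "for x in pdx: if x > 0: prefix.append(x); total += x; if total > target: return prefix"
def altLoop (pdx : List Int) (tgt : Int) : List Int → List Int → Int → List Int
  | [], _, _ => pdx
  | x :: rest, pref, tot =>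
    if 0 < x then
      if tot + x > tgt then pref ++ [x] else altLoop pdx tgt rest (pref ++ [x]) (tot + x)
    else altLoop pdx tgt rest pref tot

def get_mse_alt (pdx : List Int) : List Int :=
  if (pdx.zip (pdx.drop 1)).any (fun p => decide (p.1 < p.2)) then []  -- Python: raise ValueError; Pre_ excludes
  else
    let target := -((pdx.filter (fun x => decide (x < 0))).sum)
    if target = 0 then []
    else altLoop pdx target pdx [] 0

-- ===== PRECONDITION & SPEC =====
-- Pre_ excludes exactly the inputs that are not sorted in descending order, on which A raises (TypeError from `raise <str>`).
def Pre_get_mse (pdx : List Int) : Prop :=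
  ∀ i, i < pdx.length - 1 → pdx.getD (i + 1) 0 ≤ pdx.getD i 0
instance (pdx : List Int) : Decidable (Pre_get_mse pdx) := by unfold Pre_get_mse; infer_instance
def pvWitness_get_mse : List Int := [5, 3, 1, -2, -4]

def Spec_get_mse (pdx : List Int) (out : List Int) : Prop := out = get_mse_alt pdx
instance (pdx : List Int) (out : List Int) : Decidable (Spec_get_mse pdx out) := by unfold Spec_get_mse; infer_instance

-- ===== CLAIM (what is proved, stated in full; the proofs are below) =====
def Claim_equal_get_mse : Prop := ∀ (pdx : List Int), Dom_get_mse pdx → Pre_get_mse pdx → Spec_get_mse pdx (get_mse pdx)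

-- ===== LEMMAS AND PROOFS =====

-- A's descending check evaluates to true on a sorted list
theorem acheck_true (l : List Int) (h : Pre_get_mse l) :
    (List.range (l.length - 1)).all (fun i => decide (l.getD i 0 ≥ l.getD (i + 1) 0)) = true := by
  rw [List.all_eq_true]
  intro i hi
  rw [List.mem_range] at hi
  simpa using h i hi

-- B's out-of-order check evaluates to false on a sorted list
theorem bcheck_false (l : List Int) (h : Pre_get_mse l) :
    (l.zip (l.drop 1)).any (fun p => decide (p.1 < p.2)) = false := by
  rw [List.any_eq_false]
  intro p hp
  obtain ⟨i, hi, hpe⟩ := List.mem_iff_getElem.mp hp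
  have hlen : (l.zip (l.drop 1)).length = min l.length (l.length - 1) := by
    rw [List.length_zip, List.length_drop]
  have hi1 : i < l.length - 1 := by omega
  have hi0 : i < l.length := by omega
  have hi2 : i + 1 < l.length := by omega
  have hz : (l.zip (l.drop 1))[i] = (l[i], (l.drop 1)[i]'(by rw [List.length_drop]; omega)) :=
    List.getElem_zip
  have hd : (l.drop 1)[i]'(by rw [List.length_drop]; omega) = l[1 + i] := List.getElem_drop
  have hle := h i hi1
  rw [List.getD_eq_getElem l 0 hi0, List.getD_eq_getElem l 0 hi2] at hle
  rw [← hpe, hz, hd]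
  have heq : l[1 + i] = l[i + 1] := by congr 1; omega
  simp only [decide_eq_true_eq, heq]
  omega

-- a list of negative numbers has nonpositive sum, zero only when empty
theorem negsum (l : List Int) (h : ∀ x ∈ l, x < 0) : l.sum ≤ 0 ∧ (l.sum = 0 ↔ l = []) := by
  induction l with
  | nil => simp
  | cons a t ih =>
    have ha := h a (List.mem_cons_self ..)
    have ht := ih (fun x hx => h x (List.mem_cons_of_mem _ hx))
    simp only [List.sum_cons]
    refine ⟨by omega, ?_, fun hs => by cases hs⟩
    intro hs; exfalso; omega

-- the positives and the negatives together fit inside the list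
theorem filter_lengths (l : List Int) :
    (l.filter (fun x => decide (x > 0))).length + (l.filter (fun x => decide (x < 0))).length ≤ l.length := by
  induction l with
  | nil => simp
  | cons a t ih =>
    simp only [List.filter_cons, List.length_cons]
    by_cases h1 : a > 0
    · rw [if_pos (by simpa using h1), if_neg (by simp; omega)]
      simp only [List.length_cons]; omega
    · by_cases h2 : a < 0
      · rw [if_neg (by simpa using h1), if_pos (by simpa using h2)]
        simp only [List.length_cons]; omega
      · rw [if_neg (by simpa using h1), if_neg (by simpa using h2)]
        omega

-- A's loop returns pdx when the full positive sum never exceeds the target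
theorem aloop_none (pos : List Int) (tgt : Int) (pdx : List Int)
    (hsum : pos.sum ≤ tgt) :
    ∀ (m k : Nat), pos.length ≤ k → aloop pos tgt pdx (List.range' k m) = pdx := by
  intro m
  induction m with
  | zero => intro k _; rfl
  | succ m ih =>
    intro k hk
    rw [List.range'_succ, aloop, List.take_of_length_le hk, if_neg (by omega)]
    exact ih (k + 1) (by omega)

-- main invariant: A's index loop from position k equals B's element loop on the remaining positives
theorem aloop_alt (pos : List Int) (tgt : Int) (pdx : List Int) (hpos : ∀ x ∈ pos, 0 < x) :
    ∀ (rest : List Int) (k m : Nat), pos.drop k = rest → (pos.take k).sum ≤ tgt →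
      pos.length + 1 ≤ k + m → 1 ≤ m →
      aloop pos tgt pdx (List.range' k m) = altLoop pdx tgt rest (pos.take k) (pos.take k).sum := by
  intro rest
  induction rest generalizing pos with
  | nil =>
    intro k m hdrop hsum _ _
    have hk : pos.length ≤ k := by
      by_contra hc
      have := List.length_drop (i := k) (l := pos)
      rw [hdrop] at this
      simp at this
      omega
    rw [altLoop, aloop_none pos tgt pdx (by rwa [List.take_of_length_le hk] at hsum) m k hk]
  | cons x rest' ih =>
    intro k m hdrop hsum hlen hm
    have hklen : k < pos.length := by
      by_contra hc
      rw [List.drop_eq_nil_of_le (by omega)] at hdrop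
      simp at hdrop
    have hget : pos[k]? = some x := by
      rw [← Nat.add_zero k, ← List.getElem?_drop, hdrop]
      rfl
    have htake : pos.take (k + 1) = pos.take k ++ [x] := by
      rw [List.take_add_one, hget]
      rfl
    have hs2 : (pos.take k ++ [x]).sum = (pos.take k).sum + x := by
      rw [List.sum_append]; simp
    have hxpos : 0 < x := hpos x (List.mem_of_mem_drop (hdrop ▸ List.mem_cons_self ..))
    have hm2 : 2 ≤ m := by omega
    obtain ⟨m', rfl⟩ : ∃ m', m = m' + 1 := ⟨m - 1, by omega⟩
    rw [List.range'_succ, aloop, if_neg (by omega)]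
    rw [altLoop, if_pos hxpos]
    by_cases hcross : (pos.take k).sum + x > tgt
    · rw [if_pos hcross]
      obtain ⟨m'', rfl⟩ : ∃ m'', m' = m'' + 1 := ⟨m' - 1, by omega⟩
      rw [List.range'_succ, aloop, if_pos (by rw [htake, hs2]; omega), htake]
    · rw [if_neg hcross]
      have hrec := ih pos hpos (k + 1) m' (by rw [← List.drop_drop, hdrop]; rfl)
        (by rw [htake, hs2]; omega) (by omega) (by omega)
      rw [htake, hs2] at hrec
      exact hrec

-- B's element loop ignores nonpositive elements: it equals itself run on the positives only
theorem altLoop_filter (pdx : List Int) (tgt : Int) :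
    ∀ (l : List Int) (pref : List Int) (tot : Int),
      altLoop pdx tgt l pref tot = altLoop pdx tgt (l.filter (fun x => decide (x > 0))) pref tot := by
  intro l
  induction l with
  | nil => intro pref tot; rfl
  | cons x t ih =>
    intro pref tot
    by_cases hx : 0 < x
    · rw [List.filter_cons, if_pos (by simpa using hx)]
      rw [altLoop, altLoop]
      rw [if_pos hx, if_pos hx]
      by_cases hc : tot + x > tgt
      · rw [if_pos hc, if_pos hc]
      · rw [if_neg hc, if_neg hc, ih]
    · rw [List.filter_cons, if_neg (by simpa using hx), altLoop, if_neg hx, ih]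

-- ===== VERDICT (by name: the statement is the Claim_ definition above) =====
theorem get_mse_spec : Claim_equal_get_mse := by
  intro pdx _ hpre
  unfold Spec_get_mse get_mse get_mse_alt
  rw [acheck_true pdx hpre, bcheck_false pdx hpre]
  simp only [Bool.not_true, Bool.false_eq_true, if_false]
  set pos := pdx.filter (fun x => decide (x > 0)) with hposdef
  set neg := pdx.filter (fun x => decide (x < 0)) with hnegdef
  have hnegall : ∀ x ∈ neg, x < 0 := by
    intro x hx
    have := List.of_mem_filter hx
    simpa using this
  obtain ⟨hns, hnz⟩ := negsum neg hnegall
  by_cases hempty : neg.length = 0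
  · rw [if_pos hempty]
    have hnil : neg = [] := List.length_eq_zero_iff.mp hempty
    rw [if_pos (by rw [hnil]; simp)]
  · rw [if_neg hempty]
    have hne : neg ≠ [] := fun h => hempty (by rw [h]; rfl)
    have hsumneg : neg.sum < 0 := lt_of_le_of_ne hns (fun h => hne (hnz.mp h))
    rw [if_neg (by omega)]
    have habs : |neg.sum| = -neg.sum := abs_of_neg hsumneg
    have hposall : ∀ x ∈ pos, 0 < x := by
      intro x hx
      have := List.of_mem_filter hx
      simpa using this
    have hlen : pos.length + 1 ≤ pdx.length := by
      have := filter_lengths pdx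
      rw [← hposdef, ← hnegdef] at this
      omega
    have hmain := aloop_alt pos (-neg.sum) pdx hposall pos 0 pdx.length
      (by simp) (by simp; omega) (by omega) (by omega)
    rw [habs, List.range_eq_range', hmain]
    simp only [List.take_zero, List.sum_nil]
    rw [hposdef]
    exact (altLoop_filter pdx (-neg.sum) pdx [] 0).symm
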